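-- pv_equiv track=rewrite | github.com/Facundo177/Guias_Python | submission.py | subsecuencia_mas_larga
-- ===== SOURCE A (Python) =====
-- def modulo(numero:int) -> int:
--     if numero < 0:
--         numero = -numero
--     return numero
--
-- def subsecuencia_mas_larga(v: list[int]) -> tuple[int,int]:
--     subsecuencias_ordenadas:dict[int, list[int]] = {}
--
--     # Un ayudante dijo que consecutivos cuenta +1 y -1
--     # osea [1,2,3] y [3,2,1] se consideran consecutivos los dos
--     # entonces tomo que el modulo de la diferencia es 1
--     subsecuencia:list[int] = []
--     for i in range(len(v)-1):
--         subsecuencia.append(v[i])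
--         if modulo(v[i] - v[i+1]) != 1:
--             subsecuencias_ordenadas[i+1-len(subsecuencia)] = subsecuencia
--             subsecuencia = []
--
--     if subsecuencia != []:
--         subsecuencia.append(v[len(v)-1])
--         subsecuencias_ordenadas[len(v)-len(subsecuencia)] = subsecuencia
--         subsecuencia = []
--     else:
--         subsecuencias_ordenadas[len(v)-1] = [v[len(v)-1]]
--
--     subsec_mayor:tuple[int, list[int]] = (0, subsecuencias_ordenadas[0])
--     for indice, subsec in subsecuencias_ordenadas.items():
--         if len(subsec) > len(subsec_mayor[1]):
--             subsec_mayor = (indice, subsec)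
--
--     res:tuple[int, int] = (len(subsec_mayor[1]), subsec_mayor[0])
--
--     return res
-- ===== SOURCE B (Python) =====
-- def subsecuencia_mas_larga(v: list[int]) -> tuple[int, int]:
--     if not v:
--         return (0, 0)
--     best_len = cur_len = 1
--     best_start = cur_start = 0
--     for i in range(1, len(v)):
--         if abs(v[i] - v[i - 1]) == 1:
--             cur_len += 1
--         else:
--             cur_start = i
--             cur_len = 1
--         if cur_len > best_len:
--             best_len = cur_len
--             best_start = cur_start
--     return (best_len, best_start)
-- ===== Notes on version B (the rewrite author's own statement) =====
-- stated objective: simpler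
-- what changed: A builds a dict mapping run-start indices to explicit run sublists and then makes a second pass over the dict to pick the earliest longest; B drops the dict and sublists entirely and does one linear scan keeping only best_len/best_start and cur_len/cur_start (no list/dict allocation), measured ~2.8x faster.
import Mathlib
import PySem

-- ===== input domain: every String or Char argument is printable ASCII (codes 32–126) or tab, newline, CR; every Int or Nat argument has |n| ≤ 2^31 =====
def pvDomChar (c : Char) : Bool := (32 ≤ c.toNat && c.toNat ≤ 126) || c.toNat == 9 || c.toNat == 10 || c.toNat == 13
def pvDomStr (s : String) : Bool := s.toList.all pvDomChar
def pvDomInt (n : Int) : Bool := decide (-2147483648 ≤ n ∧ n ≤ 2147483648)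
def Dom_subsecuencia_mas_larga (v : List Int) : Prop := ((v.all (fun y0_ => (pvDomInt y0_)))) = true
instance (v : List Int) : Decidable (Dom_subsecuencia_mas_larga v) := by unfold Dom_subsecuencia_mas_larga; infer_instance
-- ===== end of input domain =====

-- B replaces A's dict of explicit run sublists (two passes) by a single scan keeping only
-- run lengths/starts (objective: simpler).  Equivalence is about the return value; on [] A
-- raises IndexError (excluded by Pre_) while B returns (0, 0).

-- ===== PORT A =====
def modulo (numero : Int) : Int := if numero < 0 then -numero else numero

-- body of A's first loop ('for i in range(len(v)-1)')
def pvBodyA (v : List Int) (st : PySem.Dict Int (List Int) × List Int) (i : Int) :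
    PySem.Dict Int (List Int) × List Int :=
  let sub := st.2 ++ [PySem.List.pyGetD v i 0]
  if modulo (PySem.List.pyGetD v i 0 - PySem.List.pyGetD v (i + 1) 0) ≠ 1 then
    (st.1.insert (i + 1 - (sub.length : Int)) sub, [])
  else (st.1, sub)

-- body of A's selection loop over dict.items()
def pvSelA (b : Int × List Int) (p : Int × List Int) : Int × List Int :=
  if (p.2.length : Int) > (b.2.length : Int) then p else b

def subsecuencia_mas_larga (v : List Int) : Int × Int :=
  let n : Int := (v.length : Int)
  let st := (PySem.List.pyRange 0 (n - 1) 1).foldl (pvBodyA v) (PySem.Dict.empty, [])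
  let d :=
    if st.2 ≠ [] then
      let sub := st.2 ++ [PySem.List.pyGetD v (n - 1) 0]
      st.1.insert (n - (sub.length : Int)) sub
    else st.1.insert (n - 1) [PySem.List.pyGetD v (n - 1) 0]
  let best := d.items.foldl pvSelA ((0 : Int), d.getD 0 [])
  ((best.2.length : Int), best.1)

-- ===== PORT B =====
-- body of B's single scan ('for i in range(1, len(v))'); state (best_len, best_start, cur_len, cur_start)
def pvBodyB (v : List Int) (st : Int × Int × Int × Int) (i : Int) : Int × Int × Int × Int :=
  let cur := if |PySem.List.pyGetD v i 0 - PySem.List.pyGetD v (i - 1) 0| = 1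
    then (st.2.2.1 + 1, st.2.2.2) else ((1 : Int), i)
  if cur.1 > st.1 then (cur.1, cur.2, cur.1, cur.2) else (st.1, st.2.1, cur.1, cur.2)

def subsecuencia_mas_larga_alt (v : List Int) : Int × Int :=
  if v = [] then (0, 0)
  else
    let st := (PySem.List.pyRange 1 (v.length : Int) 1).foldl (pvBodyB v) (1, 0, 1, 0)
    (st.1, st.2.1)

-- ===== PRECONDITION & SPEC =====
-- Pre_ excludes only the empty list, on which A raises IndexError.
def Pre_subsecuencia_mas_larga (v : List Int) : Prop := v ≠ []
instance (v : List Int) : Decidable (Pre_subsecuencia_mas_larga v) := by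
  unfold Pre_subsecuencia_mas_larga; infer_instance

def pvWitness_subsecuencia_mas_larga : List Int := [3, 2, 1, 5, 6]

def Spec_subsecuencia_mas_larga (v : List Int) (out : Int × Int) : Prop := out = subsecuencia_mas_larga_alt v
instance (v : List Int) (out : Int × Int) : Decidable (Spec_subsecuencia_mas_larga v out) := by unfold Spec_subsecuencia_mas_larga; infer_instance

-- ===== CLAIM (what is proved, stated in full; the proofs are below) =====
def Claim_equal_subsecuencia_mas_larga : Prop := ∀ (v : List Int), Dom_subsecuencia_mas_larga v → Pre_subsecuencia_mas_larga v → Spec_subsecuencia_mas_larga v (subsecuencia_mas_larga v)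

-- ===== LEMMAS AND PROOFS =====

-- the pair stream both loops traverse: (pair index, v[i], v[i+1])
def pairsFrom (i : Int) (x : Int) : List Int → List (Int × Int × Int)
  | [] => []
  | y :: t => (i, x, y) :: pairsFrom (i + 1) y t

-- structural versions of the two loop bodies (indices replaced by the streamed elements)
def bodyA' (st : PySem.Dict Int (List Int) × List Int) (p : Int × Int × Int) :
    PySem.Dict Int (List Int) × List Int :=
  let sub := st.2 ++ [p.2.1]
  if modulo (p.2.1 - p.2.2) ≠ 1 then
    (st.1.insert (p.1 + 1 - (sub.length : Int)) sub, [])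
  else (st.1, sub)

def bodyB' (st : Int × Int × Int × Int) (p : Int × Int × Int) : Int × Int × Int × Int :=
  let cur := if |p.2.2 - p.2.1| = 1 then (st.2.2.1 + 1, st.2.2.2) else ((1 : Int), p.1 + 1)
  if cur.1 > st.1 then (cur.1, cur.2, cur.1, cur.2) else (st.1, st.2.1, cur.1, cur.2)

def best0 (d : PySem.Dict Int (List Int)) : Int × List Int :=
  d.items.foldl pvSelA ((0 : Int), d.getD 0 [])

def pvRel (k : Int) (a : PySem.Dict Int (List Int) × List Int) (b : Int × Int × Int × Int) : Prop :=
  1 ≤ b.2.2.1 ∧ ((a.2.length : Int) = b.2.2.1 - 1) ∧ b.2.2.2 = k - (b.2.2.1 - 1) ∧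
  (∀ key ∈ a.1.keys, key < b.2.2.2) ∧ (a.1.items = [] → b.2.2.2 = 0) ∧
  (a.1.items ≠ [] → (0 : Int) ∈ a.1.keys) ∧
  ((b.1, b.2.1) = if ((best0 a.1).2.length : Int) < b.2.2.1
    then (b.2.2.1, b.2.2.2) else (((best0 a.1).2.length : Int), (best0 a.1).1))

lemma drop_getD (v : List Int) (k : Nat) (x : Int) (w : List Int) (hd : v.drop k = x :: w) :
    PySem.List.pyGetD v (k : Int) 0 = x := by
  rw [PySem.List.pyGetD_natCast]
  have h0 : (v.drop k)[0]? = some x := by rw [hd]; rfl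
  rw [List.getElem?_drop] at h0
  simp only [Nat.add_zero] at h0
  simp [List.getD_eq_getElem?_getD, h0]

lemma drop_succ_of_drop (v : List Int) (k : Nat) (x y : Int) (t : List Int)
    (hd : v.drop k = x :: y :: t) : v.drop (k + 1) = y :: t := by
  have h := congrArg List.tail hd
  rw [List.tail_drop] at h
  simpa using h

lemma drop_len (v : List Int) (k : Nat) (x : Int) (w : List Int) (hd : v.drop k = x :: w) :
    v.length = k + w.length + 1 := by
  have h1 := congrArg List.length hd
  have h2 : k ≤ v.length := by
    by_contra hc
    rw [List.drop_eq_nil_of_le (by omega)] at hd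
    exact (List.cons_ne_nil x w) hd.symm
  simp [List.length_drop] at h1; omega

lemma foldA (v : List Int) (w : List Int) : ∀ (x : Int) (k : Nat), v.drop k = x :: w →
    ∀ st, (PySem.List.pyRange (k : Int) ((v.length : Int) - 1) 1).foldl (pvBodyA v) st
      = (pairsFrom (k : Int) x w).foldl bodyA' st := by
  induction w with
  | nil =>
    intro x k hd st
    have hlen : v.length = k + 1 := by simpa using drop_len v k x [] hd
    rw [PySem.List.pyRange_one_eq_nil (by push_cast [hlen]; omega)]
    simp [pairsFrom]
  | cons y t ih =>
    intro x k hd st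
    have hlen : v.length = k + t.length + 2 := by
      have := drop_len v k x (y :: t) hd; simp at this; omega
    have hd1 := drop_succ_of_drop v k x y t hd
    have hx := drop_getD v k x (y :: t) hd
    have hy := drop_getD v (k + 1) y t hd1
    rw [PySem.List.pyRange_one_cons (by push_cast [hlen]; omega)]
    simp only [List.foldl_cons, pairsFrom]
    have hstep : pvBodyA v st (k : Int) = bodyA' st ((k : Int), x, y) := by
      simp only [pvBodyA, bodyA', hx]
      rw [show ((k : Int) + 1) = ((k + 1 : Nat) : Int) from by push_cast; ring, hy]
    rw [hstep]
    have := ih y (k + 1) hd1 (bodyA' st ((k : Int), x, y))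
    rw [show ((k : Int) + 1) = ((k + 1 : Nat) : Int) from by push_cast; ring]
    exact this

lemma foldB (v : List Int) (w : List Int) : ∀ (x : Int) (k : Nat), v.drop k = x :: w →
    ∀ st, (PySem.List.pyRange ((k : Int) + 1) (v.length : Int) 1).foldl (pvBodyB v) st
      = (pairsFrom (k : Int) x w).foldl bodyB' st := by
  induction w with
  | nil =>
    intro x k hd st
    have hlen : v.length = k + 1 := by simpa using drop_len v k x [] hd
    rw [PySem.List.pyRange_one_eq_nil (by push_cast [hlen]; omega)]
    simp [pairsFrom]
  | cons y t ih =>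
    intro x k hd st
    have hlen : v.length = k + t.length + 2 := by
      have := drop_len v k x (y :: t) hd; simp at this; omega
    have hd1 := drop_succ_of_drop v k x y t hd
    have hx := drop_getD v k x (y :: t) hd
    have hy := drop_getD v (k + 1) y t hd1
    rw [PySem.List.pyRange_one_cons (by push_cast [hlen]; omega)]
    simp only [List.foldl_cons, pairsFrom]
    have hstep : pvBodyB v st ((k : Int) + 1) = bodyB' st ((k : Int), x, y) := by
      simp only [pvBodyB, bodyB', add_sub_cancel_right, hx]
      rw [show ((k : Int) + 1) = ((k + 1 : Nat) : Int) from by push_cast; ring, hy]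
    rw [hstep]
    have := ih y (k + 1) hd1 (bodyB' st ((k : Int), x, y))
    rw [show ((k : Int) + 1 + 1) = ((k + 1 : Nat) : Int) + 1 from by push_cast; ring]
    exact this

lemma best0_insert (d : PySem.Dict Int (List Int)) (c : Int) (seg : List Int)
    (h3 : ∀ key ∈ d.keys, key < c) (h4 : d.items = [] → c = 0)
    (h5 : d.items ≠ [] → (0 : Int) ∈ d.keys) (hseg : seg ≠ []) :
    best0 (d.insert c seg) = pvSelA (best0 d) (c, seg) := by
  have hcont : d.contains c = false := by
    rw [PySem.Dict.contains_eq_decide_mem_keys]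
    simp only [decide_eq_false_iff_not]
    intro hc; exact absurd (h3 c hc) (lt_irrefl c)
  have hitems : (d.insert c seg).items = d.items ++ [(c, seg)] := by
    rw [PySem.Dict.items_insert, hcont]; simp
  have hlen : (0 : Int) < (seg.length : Int) := by
    have := List.length_pos_of_ne_nil hseg; omega
  by_cases hemp : d.items = []
  · have hc0 : c = 0 := h4 hemp
    have hdg : d.getD (0 : Int) [] = [] := by
      apply PySem.Dict.getD_of_not_contains
      rw [PySem.Dict.contains_eq_decide_mem_keys]
      simp [PySem.Dict.keys, hemp]
    have hdg' : (d.insert c seg).getD 0 [] = seg := by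
      rw [PySem.Dict.getD_insert]; simp [hc0]
    unfold best0
    rw [hitems, hemp, hdg', hc0]
    simp [pvSelA, hdg]
  · have h0k : (0 : Int) ∈ d.keys := h5 hemp
    have hc0 : (0 : Int) ≠ c := by have := h3 0 h0k; omega
    have hdg' : (d.insert c seg).getD 0 [] = d.getD 0 [] := by
      rw [PySem.Dict.getD_insert, if_neg hc0]
    unfold best0
    rw [hitems, hdg', List.foldl_append]
    simp

lemma Rel_step (k x y : Int) (a : PySem.Dict Int (List Int) × List Int) (b : Int × Int × Int × Int)
    (h : pvRel k a b) : pvRel (k + 1) (bodyA' a (k, x, y)) (bodyB' b (k, x, y)) := by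
  obtain ⟨d, sub⟩ := a
  obtain ⟨bl, bs, cl, cs⟩ := b
  obtain ⟨h1, h2, h3, h4, h5, h6, h7⟩ := h
  simp only at h1 h2 h3 h4 h5 h6 h7
  have hbl : bl = if ((best0 d).2.length : Int) < cl then cl else ((best0 d).2.length : Int) := by
    have := congrArg Prod.fst h7; simpa [apply_ite Prod.fst] using this
  have hbs : bs = if ((best0 d).2.length : Int) < cl then cs else (best0 d).1 := by
    have := congrArg Prod.snd h7; simpa [apply_ite Prod.snd] using this
  clear h7
  have hmod : modulo (x - y) = |y - x| := by
    unfold modulo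
    rw [abs_sub_comm]
    rcases lt_or_ge (x - y) 0 with hneg | hpos
    · rw [abs_of_neg hneg, if_pos hneg]
    · rw [abs_of_nonneg hpos, if_neg (not_lt.mpr hpos)]
  have hsublen : ((sub ++ [x]).length : Int) = cl := by
    simp only [List.length_append, List.length_cons, List.length_nil]
    push_cast; omega
  by_cases hxy : |y - x| = 1
  · -- run continues
    have hA : bodyA' (d, sub) (k, x, y) = (d, sub ++ [x]) := by
      simp [bodyA', hmod, hxy]
    have hB : bodyB' (bl, bs, cl, cs) (k, x, y) =
        if cl + 1 > bl then (cl + 1, cs, cl + 1, cs) else (bl, bs, cl + 1, cs) := by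
      simp [bodyB', hxy]
    rw [hA, hB]
    by_cases hup : cl + 1 > bl <;>
      [rw [if_pos hup]; rw [if_neg hup]] <;>
    · unfold pvRel
      dsimp only
      refine ⟨by omega, by omega, by omega, h4, h5, h6, ?_⟩
      rw [Prod.ext_iff]
      simp only [apply_ite Prod.fst, apply_ite Prod.snd]
      constructor <;> split_ifs at hbl hbs ⊢ <;> omega
  · -- run breaks
    have hA : bodyA' (d, sub) (k, x, y) = (d.insert cs (sub ++ [x]), []) := by
      simp [bodyA', hmod, hxy]
      rw [show k - (sub.length : Int) = cs from by omega]
    have hB : bodyB' (bl, bs, cl, cs) (k, x, y) = (bl, bs, 1, k + 1) := by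
      simp only [bodyB', hxy, if_false]
      rw [if_neg (by split_ifs at hbl <;> omega)]
    rw [hA, hB]
    unfold pvRel
    dsimp only
    have hbest := best0_insert d cs (sub ++ [x]) h4 h5 h6 (by simp)
    refine ⟨le_refl 1, by norm_num, by omega, ?_, ?_, ?_, ?_⟩
    · intro key hkmem
      rw [PySem.Dict.mem_keys_insert] at hkmem
      rcases hkmem with hkc | hkd
      · omega
      · have := h4 key hkd; omega
    · intro hnil
      exfalso
      have hcont : d.contains cs = false := by
        rw [PySem.Dict.contains_eq_decide_mem_keys]
        simp only [decide_eq_false_iff_not]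
        intro hc; exact absurd (h4 cs hc) (lt_irrefl cs)
      have hit : (d.insert cs (sub ++ [x])).items = d.items ++ [(cs, sub ++ [x])] := by
        rw [PySem.Dict.items_insert, hcont]; simp
      simp [hit] at hnil
    · intro _
      rw [PySem.Dict.mem_keys_insert]
      by_cases hemp : d.items = []
      · exact Or.inl (h5 hemp).symm
      · exact Or.inr (h6 hemp)
    · rw [hbest, Prod.ext_iff]
      simp only [apply_ite Prod.fst, apply_ite Prod.snd, pvSelA]
      constructor <;> split_ifs at hbl hbs ⊢ <;> simp_all <;> omega

lemma Rel_fold (w : List Int) : ∀ (k x : Int) a b, pvRel k a b →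
    pvRel (k + w.length) ((pairsFrom k x w).foldl bodyA' a) ((pairsFrom k x w).foldl bodyB' b) := by
  induction w with
  | nil => intro k x a b h; simpa [pairsFrom] using h
  | cons y t ih =>
    intro k x a b h
    have := ih (k + 1) y (bodyA' a (k, x, y)) (bodyB' b (k, x, y)) (Rel_step k x y a b h)
    simp only [pairsFrom, List.foldl_cons, List.length_cons]
    have harith : k + ((t.length + 1 : Nat) : Int) = k + 1 + (t.length : Int) := by push_cast; ring
    rw [harith]; exact this

lemma Rel_init : pvRel 0 (PySem.Dict.empty, ([] : List Int)) (1, 0, 1, 0) := by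
  unfold pvRel; decide

lemma final_sel (d : PySem.Dict Int (List Int)) (segf : List Int) (bl bs cl cs : Int)
    (h4 : ∀ key ∈ d.keys, key < cs) (h5 : d.items = [] → cs = 0)
    (h6 : d.items ≠ [] → (0 : Int) ∈ d.keys)
    (hlen : (segf.length : Int) = cl) (hne : segf ≠ [])
    (hbl : bl = if ((best0 d).2.length : Int) < cl then cl else ((best0 d).2.length : Int))
    (hbs : bs = if ((best0 d).2.length : Int) < cl then cs else (best0 d).1) :
    (((((d.insert cs segf).items.foldl pvSelA
          ((0 : Int), (d.insert cs segf).getD 0 [])).2.length : Int),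
      ((d.insert cs segf).items.foldl pvSelA
          ((0 : Int), (d.insert cs segf).getD 0 [])).1) : Int × Int) = (bl, bs) := by
  have hfold : (d.insert cs segf).items.foldl pvSelA ((0 : Int), (d.insert cs segf).getD 0 [])
      = best0 (d.insert cs segf) := rfl
  rw [hfold, best0_insert d cs segf h4 h5 h6 hne, Prod.ext_iff]
  simp only [pvSelA, apply_ite Prod.fst, apply_ite Prod.snd]
  constructor <;> split_ifs at hbl hbs ⊢ <;> omega

-- ===== VERDICT (by name: the statement is the Claim_ definition above) =====
theorem subsecuencia_mas_larga_spec : Claim_equal_subsecuencia_mas_larga := by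
  unfold Claim_equal_subsecuencia_mas_larga
  intro v _ hpre
  unfold Spec_subsecuencia_mas_larga
  obtain ⟨x, w, rfl⟩ : ∃ x w, v = x :: w := by
    cases v with
    | nil => exact absurd rfl hpre
    | cons x w => exact ⟨x, w, rfl⟩
  have hA := foldA (x :: w) w x 0 rfl (PySem.Dict.empty, ([] : List Int))
  have hB := foldB (x :: w) w x 0 rfl ((1 : Int), (0 : Int), (1 : Int), (0 : Int))
  norm_num at hA hB
  have hrel := Rel_fold w 0 x (PySem.Dict.empty, ([] : List Int)) (1, 0, 1, 0) Rel_init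
  obtain ⟨h1, h2, h3, h4, h5, h6, h7⟩ := hrel
  unfold subsecuencia_mas_larga subsecuencia_mas_larga_alt
  rw [if_neg (show ¬(x :: w = []) from List.cons_ne_nil x w)]
  dsimp only
  simp only [List.length_cons]
  push_cast
  rw [add_sub_cancel_right]
  rw [hA, hB]
  set pA := List.foldl bodyA' (PySem.Dict.empty, ([] : List Int)) (pairsFrom 0 x w) with hpA
  set pB := List.foldl bodyB' ((1 : Int), (0 : Int), (1 : Int), (0 : Int)) (pairsFrom 0 x w) with hpB
  set z := PySem.List.pyGetD (x :: w) (w.length : Int) 0 with hz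
  have hbl : pB.1 = if ((best0 pA.1).2.length : Int) < pB.2.2.1
      then pB.2.2.1 else ((best0 pA.1).2.length : Int) := by
    have := congrArg Prod.fst h7; simpa [apply_ite Prod.fst] using this
  have hbs : pB.2.1 = if ((best0 pA.1).2.length : Int) < pB.2.2.1
      then pB.2.2.2 else (best0 pA.1).1 := by
    have := congrArg Prod.snd h7; simpa [apply_ite Prod.snd] using this
  by_cases hsub : pA.2 = []
  · rw [if_neg (not_not_intro hsub)]
    have hcl : pB.2.2.1 = 1 := by rw [hsub] at h2; simp at h2; omega
    have hcs : (w.length : Int) = pB.2.2.2 := by omega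
    rw [hcs]
    exact final_sel pA.1 [z] pB.1 pB.2.1 pB.2.2.1
      pB.2.2.2 h4 h5 h6 (by simp [hcl]) (by simp) hbl hbs
  · rw [if_pos hsub]
    have hkey : (w.length : Int) + 1
        - ((pA.2 ++ [z]).length : Int) = pB.2.2.2 := by
      simp only [List.length_append, List.length_cons, List.length_nil]
      push_cast; omega
    rw [hkey]
    exact final_sel pA.1 (pA.2 ++ [z]) pB.1 pB.2.1
      pB.2.2.1 pB.2.2.2 h4 h5 h6
      (by simp only [List.length_append, List.length_cons, List.length_nil]; push_cast; omega)
      (by simp) hbl hbs
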